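-- pv_equiv track=rewrite | github.com/abjugard/advent-of-code-2024 | src/day09-disk_defragmenter.py | merge_free_space
-- ===== SOURCE A (Python) =====
-- def merge_free_space(filesystem):
--   new_fs = []
--   free_space = 0
--   for i in range(len(filesystem)):
--     k, s, v = filesystem[i]
--     if k == 'file':
--       new_fs.append((k, s, v))
--       free_space = 0
--       continue
--     free_space += s
--     if i + 1 < len(filesystem):
--       k, s, v = filesystem[i+1]
--       if k == 'space':
--         continue
--     new_fs.append(('space', free_space, 0))
--   return new_fs
-- ===== SOURCE B (Python) =====
-- def merge_free_space(filesystem):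
--     # running free-space total at each position (reset by every file entry)
--     totals = []
--     running = 0
--     for kind, size, _ in filesystem:
--         running = 0 if kind == 'file' else running + size
--         totals.append(running)
--     # kind of each entry's successor (None for the last entry)
--     next_kinds = [t[0] for t in filesystem[1:]] + [None]
--     # keep files verbatim; a free-space total is emitted at the end of each space run
--     return [t if t[0] == 'file' else ('space', total, 0)
--             for t, total, nk in zip(filesystem, totals, next_kinds)
--             if t[0] == 'file' or nk != 'space']
-- ===== Notes on version B (the rewrite author's own statement) =====
-- stated objective: alternative
-- what changed: Replaces A's single stateful loop (carried accumulator, continue statements, index lookahead at filesystem[i+1]) by a dataflow decomposition: precompute the running free-space total at every position and each entry's successor kind, then build the result in one filtered comprehension over the zipped lists.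
import Mathlib
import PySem

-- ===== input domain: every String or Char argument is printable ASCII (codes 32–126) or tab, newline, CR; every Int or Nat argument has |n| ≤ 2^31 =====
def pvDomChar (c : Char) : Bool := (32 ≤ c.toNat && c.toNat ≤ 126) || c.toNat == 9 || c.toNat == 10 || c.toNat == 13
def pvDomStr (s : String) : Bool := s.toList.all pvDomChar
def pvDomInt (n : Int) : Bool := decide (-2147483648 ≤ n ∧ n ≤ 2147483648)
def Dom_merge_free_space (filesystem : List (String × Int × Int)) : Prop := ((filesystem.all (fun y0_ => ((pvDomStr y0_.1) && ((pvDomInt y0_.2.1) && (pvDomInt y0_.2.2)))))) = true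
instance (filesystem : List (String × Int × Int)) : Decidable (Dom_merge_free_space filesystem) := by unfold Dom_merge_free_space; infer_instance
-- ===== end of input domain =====

-- B replaces A's stateful accumulator loop by a dataflow pass: precomputed running totals and
-- successor kinds, combined in one filtered comprehension (alternative decomposition, same cost).

-- ===== PORT A =====
-- A's single indexed loop; fs[i] is the head of the remaining suffix, fs[i+1] the head of its tail.
def mfsALoop (rest new_fs : List (String × Int × Int)) (free_space : Int) : List (String × Int × Int) :=
  match rest with
  | [] => new_fs
  | (k, s, v) :: tail =>
    if k == "file" then mfsALoop tail (new_fs ++ [(k, s, v)]) 0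
    else
      let fsp := free_space + s
      match tail with
      | (k', _, _) :: _ =>
        if k' == "space" then mfsALoop tail new_fs fsp
        else mfsALoop tail (new_fs ++ [("space", fsp, 0)]) fsp
      | [] => mfsALoop tail (new_fs ++ [("space", fsp, 0)]) fsp

def merge_free_space (filesystem : List (String × Int × Int)) : List (String × Int × Int) :=
  mfsALoop filesystem [] 0

-- ===== PORT B =====
-- Source B's first loop: totals.append(running) with running reset by file entries
def mfsTotals (filesystem : List (String × Int × Int)) : List Int :=
  (filesystem.foldl
    (fun (p : List Int × Int) t =>
      let running := if t.1 == "file" then 0 else p.2 + t.2.1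
      (p.1 ++ [running], running))
    ([], 0)).1

-- Source B's next_kinds = [t[0] for t in filesystem[1:]] + [None]
def mfsNextKinds (filesystem : List (String × Int × Int)) : List (Option String) :=
  (filesystem.drop 1).map (fun t => some t.1) ++ [none]

-- Source B's final comprehension over zip(filesystem, totals, next_kinds)
def merge_free_space_alt (filesystem : List (String × Int × Int)) : List (String × Int × Int) :=
  ((filesystem.zip ((mfsTotals filesystem).zip (mfsNextKinds filesystem))).filterMap
    (fun x =>
      let t := x.1; let total := x.2.1; let nk := x.2.2
      if t.1 == "file" || nk != some "space" then
        some (if t.1 == "file" then t else ("space", total, 0))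
      else none))

-- ===== PRECONDITION & SPEC =====
def Spec_merge_free_space (filesystem : List (String × Int × Int)) (out : List (String × Int × Int)) : Prop := out = merge_free_space_alt filesystem
instance (filesystem : List (String × Int × Int)) (out : List (String × Int × Int)) : Decidable (Spec_merge_free_space filesystem out) := by unfold Spec_merge_free_space; infer_instance

-- ===== CLAIM (what is proved, stated in full; the proofs are below) =====
def Claim_equal_merge_free_space : Prop := ∀ (filesystem : List (String × Int × Int)), Dom_merge_free_space filesystem → Spec_merge_free_space filesystem (merge_free_space filesystem)

-- ===== LEMMAS AND PROOFS =====

-- common recursive specification: g acc fs = what A emits on suffix fs with carried accumulator acc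
def mfsG (acc : Int) (fs : List (String × Int × Int)) : List (String × Int × Int) :=
  match fs with
  | [] => []
  | (k, s, v) :: tail =>
    if k == "file" then (k, s, v) :: mfsG 0 tail
    else
      let a := acc + s
      (match tail with
       | (k', _, _) :: _ => if k' == "space" then [] else [("space", a, 0)]
       | [] => [("space", a, 0)]) ++ mfsG a tail

-- A's loop equals the spec with its output accumulator made explicit
theorem mfsALoop_eq_g (fs : List (String × Int × Int)) :
    ∀ (out : List (String × Int × Int)) (acc : Int),
      mfsALoop fs out acc = out ++ mfsG acc fs := by
  induction fs with
  | nil => intro out acc; simp [mfsALoop, mfsG]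
  | cons t tail ih =>
    intro out acc
    obtain ⟨k, s, v⟩ := t
    by_cases hk : k = "file"
    · subst hk
      rw [show mfsALoop (("file", s, v) :: tail) out acc
            = mfsALoop tail (out ++ [("file", s, v)]) 0 by simp [mfsALoop]]
      rw [ih (out ++ [("file", s, v)]) 0]
      simp [mfsG]
    · cases tail with
      | nil =>
        rw [show mfsALoop [(k, s, v)] out acc
              = out ++ [("space", acc + s, 0)] by simp [mfsALoop, hk]]
        simp [mfsG, hk]
      | cons t2 rest =>
        obtain ⟨k2, s2, v2⟩ := t2
        by_cases h2 : k2 = "space"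
        · subst h2
          rw [show mfsALoop ((k, s, v) :: ("space", s2, v2) :: rest) out acc
                = mfsALoop (("space", s2, v2) :: rest) out (acc + s) by
              simp [mfsALoop, hk]]
          rw [ih out (acc + s)]
          simp [mfsG, hk]
        · rw [show mfsALoop ((k, s, v) :: (k2, s2, v2) :: rest) out acc
                = mfsALoop ((k2, s2, v2) :: rest)
                    (out ++ [("space", acc + s, 0)]) (acc + s) by
              simp [mfsALoop, hk, h2]]
          rw [ih (out ++ [("space", acc + s, 0)]) (acc + s)]
          simp [mfsG, hk, h2]

-- the running-totals scan, head-recursively (proof-only helper)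
def mfsScan (acc : Int) (fs : List (String × Int × Int)) : List Int :=
  match fs with
  | [] => []
  | t :: tail =>
    let r := if t.1 == "file" then 0 else acc + t.2.1
    r :: mfsScan r tail

theorem mfsTotals_fold (fs : List (String × Int × Int)) :
    ∀ (l : List Int) (acc : Int),
      (fs.foldl
        (fun (p : List Int × Int) t =>
          let running := if t.1 == "file" then 0 else p.2 + t.2.1
          (p.1 ++ [running], running)) (l, acc)).1
      = l ++ mfsScan acc fs := by
  induction fs with
  | nil => intro l acc; simp [mfsScan]
  | cons t tail ih =>
    intro l acc
    rw [List.foldl_cons]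
    dsimp only
    rw [ih]
    simp [mfsScan]

theorem mfsTotals_eq_scan (fs : List (String × Int × Int)) :
    mfsTotals fs = mfsScan 0 fs := by
  unfold mfsTotals
  rw [mfsTotals_fold fs [] 0]
  simp

-- B's zipped comprehension over a suffix, with the carried accumulator, equals the spec
theorem mfsB_suffix (fs : List (String × Int × Int)) :
    ∀ (acc : Int),
      ((fs.zip ((mfsScan acc fs).zip (mfsNextKinds fs))).filterMap
        (fun x =>
          let t := x.1; let total := x.2.1; let nk := x.2.2
          if t.1 == "file" || nk != some "space" then
            some (if t.1 == "file" then t else ("space", total, 0))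
          else none))
      = mfsG acc fs := by
  induction fs with
  | nil => intro acc; simp [mfsScan, mfsG]
  | cons t tail ih =>
    intro acc
    obtain ⟨k, s, v⟩ := t
    cases tail with
    | nil =>
      by_cases hk : k = "file"
      · subst hk
        simp [mfsNextKinds, mfsScan, mfsG]
      · simp [mfsNextKinds, mfsScan, mfsG, hk]
    | cons u us =>
      have hnk : mfsNextKinds ((k, s, v) :: u :: us)
          = some u.1 :: mfsNextKinds (u :: us) := by
        simp [mfsNextKinds]
      rw [hnk]
      by_cases hk : k = "file"
      · subst hk
        rw [show mfsScan acc (("file", s, v) :: u :: us) = 0 :: mfsScan 0 (u :: us) by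
              simp [mfsScan]]
        simp only [List.zip_cons_cons, List.filterMap_cons]
        rw [ih 0]
        simp [mfsG]
      · rw [show mfsScan acc ((k, s, v) :: u :: us)
              = (acc + s) :: mfsScan (acc + s) (u :: us) by simp [mfsScan, hk]]
        simp only [List.zip_cons_cons, List.filterMap_cons]
        rw [ih (acc + s)]
        obtain ⟨k2, s2, v2⟩ := u
        by_cases h2 : k2 = "space"
        · subst h2; simp [mfsG, hk]
        · simp [mfsG, hk, h2]

-- ===== VERDICT (by name: the statement is the Claim_ definition above) =====
theorem merge_free_space_spec : Claim_equal_merge_free_space := by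
  intro fs _
  unfold Spec_merge_free_space merge_free_space merge_free_space_alt
  rw [mfsALoop_eq_g fs [] 0, mfsTotals_eq_scan, mfsB_suffix fs 0]
  simp
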